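-- pv_equiv track=rewrite | github.com/jomag/advent-of-code | 2024/day15/day15.py | parse
-- ===== SOURCE A (Python) =====
-- def parse(data):
--     moves, robot, boxes, walls = None, None, set(), set()
--
--     for y, line in enumerate(data):
--         if data[y] == "":
--             moves = "".join(data[y + 1 :])
--             break
--
--         for x, c in enumerate(line):
--             if c == "#":
--                 walls.add((x, y))
--             if c == "@":
--                 robot = (x, y)
--             if c == "O":
--                 boxes.add((x, y))
--
--     return walls, boxes, robot, moves
-- ===== SOURCE B (Python) =====
-- def parse(data):
--     # Phase 1: split the input at the first blank line (if any).
--     sep = data.index("") if "" in data else None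
--     grid = data if sep is None else data[:sep]
--     moves = None if sep is None else "".join(data[sep + 1:])
--
--     # Phase 2: flatten the map block into a single cell list, then filter.
--     cells = [(c, (x, y)) for y, line in enumerate(grid) for x, c in enumerate(line)]
--     walls = {p for c, p in cells if c == "#"}
--     boxes = {p for c, p in cells if c == "O"}
--     robots = [p for c, p in cells if c == "@"]
--     robot = robots[-1] if robots else None
--     return walls, boxes, robot, moves
-- ===== Notes on version B (the rewrite author's own statement) =====
-- stated objective: simpler
-- what changed: A's single fused loop with a break and a flag is replaced by a two-phase structure: first split the input at the first blank line into a map block and a moves block, then flatten the map block into one cell list and obtain walls/boxes/robot by plain filters, the robot being the last '@' cell.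
import Mathlib
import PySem

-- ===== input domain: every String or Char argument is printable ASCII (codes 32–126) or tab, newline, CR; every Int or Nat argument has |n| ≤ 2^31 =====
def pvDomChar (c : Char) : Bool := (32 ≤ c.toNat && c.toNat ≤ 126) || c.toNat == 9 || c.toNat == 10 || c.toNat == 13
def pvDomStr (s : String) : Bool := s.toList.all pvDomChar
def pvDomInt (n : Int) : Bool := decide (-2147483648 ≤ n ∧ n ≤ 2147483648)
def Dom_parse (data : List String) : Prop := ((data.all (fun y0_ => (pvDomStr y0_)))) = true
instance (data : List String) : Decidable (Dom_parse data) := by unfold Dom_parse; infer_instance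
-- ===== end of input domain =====

-- B replaces A's fused scan-with-break by a two-phase structure (split at the first blank
-- line, then flatten the map block to a cell list and filter); objective: simpler.

-- ===== PORT A =====
-- state carried by A's loop: (robot, boxes, walls)
abbrev PvSt := Option (Int × Int) × PySem.Set (Int × Int) × PySem.Set (Int × Int)
abbrev PvRes := (List (Int × Int)) × (List (Int × Int)) × (Option (Int × Int)) × Option String

-- the inner 'for x, c in enumerate(line)' body (three independent ifs, in A's order)
def parseStep (y : Int) (st : PvSt) (xc : Int × Char) : PvSt :=
  let walls := if xc.2 = '#' then PySem.Set.add st.2.2 (xc.1, y) else st.2.2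
  let robot := if xc.2 = '@' then some (xc.1, y) else st.1
  let boxes := if xc.2 = 'O' then PySem.Set.add st.2.1 (xc.1, y) else st.2.1
  (robot, boxes, walls)

def parseScanLine (y : Int) (line : String) (st : PvSt) : PvSt :=
  (PySem.List.enumerate line.toList).foldl (parseStep y) st

-- the outer 'for y, line in enumerate(data)' with its break; `line` IS `data[y]`
-- (enumerate), so the test `data[y] == ""` is ported as `line = ""`
def parseGo (data : List String) (rest : List String) (y : Int) (st : PvSt) : PvRes :=
  match rest with
  | [] => (st.2.2, st.2.1, st.1, none)
  | line :: rs =>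
    if line = "" then
      (st.2.2, st.2.1, st.1,
        some (PySem.Str.join "" (PySem.List.slice data (some (y + 1)) none)))
    else
      parseGo data rs (y + 1) (parseScanLine y line st)

def parse (data : List String) : (List (Int × Int)) × (List (Int × Int)) × (Option (Int × Int)) × Option String :=
  parseGo data data 0 (none, PySem.Set.empty, PySem.Set.empty)

-- ===== PORT B =====
def parse_alt (data : List String) : (List (Int × Int)) × (List (Int × Int)) × (Option (Int × Int)) × Option String :=
  let sep := PySem.List.index? data ""
  let grid := match sep with
    | none => data
    | some s => PySem.List.slice data none (some (s : Int))          -- data[:sep]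
  let moves : Option String := match sep with
    | none => none
    | some s => some (PySem.Str.join "" (PySem.List.slice data (some ((s : Int) + 1)) none))
  let cells := (PySem.List.enumerate grid).flatMap (fun yl =>
      (PySem.List.enumerate yl.2.toList).map (fun xc => (xc.2, (xc.1, yl.1))))
  let walls := PySem.Set.ofList ((cells.filter (fun p => p.1 = '#')).map (·.2))
  let boxes := PySem.Set.ofList ((cells.filter (fun p => p.1 = 'O')).map (·.2))
  let robots := (cells.filter (fun p => p.1 = '@')).map (·.2)
  (walls, boxes, robots.getLast?, moves)                             -- robots[-1] if robots else None

-- ===== PRECONDITION & SPEC =====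
def Spec_parse (data : List String) (out : (List (Int × Int)) × (List (Int × Int)) × (Option (Int × Int)) × Option String) : Prop := out = parse_alt data
instance (data : List String) (out : (List (Int × Int)) × (List (Int × Int)) × (Option (Int × Int)) × Option String) : Decidable (Spec_parse data out) := by unfold Spec_parse; infer_instance

-- ===== CLAIM (what is proved, stated in full; the proofs are below) =====
def Claim_equal_parse : Prop := ∀ (data : List String), Dom_parse data → Spec_parse data (parse data)

-- ===== LEMMAS AND PROOFS =====

-- the cell list of a map block starting at row y, in scan order
def pvLineCells (y : Int) (line : String) : List (Char × Int × Int) :=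
  (PySem.List.enumerate line.toList).map (fun xc => (xc.2, (xc.1, y)))

def pvCellsFrom (y : Int) : List String → List (Char × Int × Int)
  | [] => []
  | l :: ls => pvLineCells y l ++ pvCellsFrom (y + 1) ls

-- positions of the cells holding character c
def pvSel (c : Char) (q : List (Char × Int × Int)) : List (Int × Int) :=
  (q.filter (fun p => p.1 = c)).map (·.2)

theorem pvSel_append (c : Char) (q r : List (Char × Int × Int)) :
    pvSel c (q ++ r) = pvSel c q ++ pvSel c r := by
  simp [pvSel]

-- B's flatMap over enumerate is pvCellsFrom
theorem pvCells_eq (grid : List String) (y : Int) :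
    (PySem.List.enumerate grid y).flatMap (fun yl =>
      (PySem.List.enumerate yl.2.toList).map (fun xc => (xc.2, (xc.1, yl.1))))
      = pvCellsFrom y grid := by
  induction grid generalizing y with
  | nil => simp [PySem.List.enumerate_nil, pvCellsFrom]
  | cons l ls ih =>
    simp [PySem.List.enumerate_cons, pvCellsFrom, pvLineCells, ih]

theorem pvGetLast?_cons_or {α : Type} (a : α) (l : List α) (r : Option α) :
    ((a :: l).getLast?).or r = (l.getLast?).or (some a) := by
  cases l with
  | nil => rfl
  | cons b m =>
    rw [List.getLast?_cons_cons]
    cases h : (b :: m).getLast? with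
    | none => exact absurd h (by simp)
    | some v => simp

-- the inner fold, characterised over an arbitrary enumerated list
theorem pvFold_step (y : Int) (ps : List (Int × Char)) :
    ∀ (r : Option (Int × Int)) (b w : PySem.Set (Int × Int)),
    ps.foldl (parseStep y) (r, b, w) =
      ((pvSel '@' (ps.map (fun xc => (xc.2, (xc.1, y))))).getLast?.or r,
       PySem.Set.update b (pvSel 'O' (ps.map (fun xc => (xc.2, (xc.1, y))))),
       PySem.Set.update w (pvSel '#' (ps.map (fun xc => (xc.2, (xc.1, y)))))) := by
  induction ps with
  | nil => intro r b w; simp [pvSel, PySem.Set.update]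
  | cons p ps ih =>
    intro r b w
    rcases p with ⟨x, c⟩
    simp only [List.foldl_cons, parseStep, List.map_cons]
    rw [ih]
    by_cases h1 : c = '#' <;> by_cases h2 : c = '@' <;> by_cases h3 : c = 'O' <;>
      simp [pvSel, PySem.Set.update, h1, h2, h3, pvGetLast?_cons_or,
        -List.getLast?_map]

theorem pvScanLine_eq (y : Int) (line : String) (r : Option (Int × Int))
    (b w : PySem.Set (Int × Int)) :
    parseScanLine y line (r, b, w) =
      ((pvSel '@' (pvLineCells y line)).getLast?.or r,
       PySem.Set.update b (pvSel 'O' (pvLineCells y line)),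
       PySem.Set.update w (pvSel '#' (pvLineCells y line))) := by
  simp [parseScanLine, pvLineCells, pvFold_step]

-- A's loop when it never meets a blank line
theorem pvGo_noSep (ls : List String) (hls : "" ∉ ls) :
    ∀ (data : List String) (y : Int) (r : Option (Int × Int)) (b w : PySem.Set (Int × Int)),
    parseGo data ls y (r, b, w) =
      (PySem.Set.update w (pvSel '#' (pvCellsFrom y ls)),
       PySem.Set.update b (pvSel 'O' (pvCellsFrom y ls)),
       (pvSel '@' (pvCellsFrom y ls)).getLast?.or r, none) := by
  induction ls with
  | nil => intro data y r b w; simp [parseGo, pvCellsFrom, pvSel, PySem.Set.update]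
  | cons l ls ih =>
    intro data y r b w
    have hl : l ≠ "" := fun h => hls (h ▸ List.mem_cons_self)
    have hls' : "" ∉ ls := fun h => hls (List.mem_cons_of_mem _ h)
    simp only [parseGo, if_neg hl, pvScanLine_eq, ih hls', pvCellsFrom, pvSel_append]
    simp [PySem.Set.update, List.foldl_append, List.getLast?_append, Option.or_assoc]

-- A's loop when a blank line is met after the all-nonblank prefix `grid`
theorem pvGo_sep (grid : List String) (hg : "" ∉ grid) :
    ∀ (tail data : List String) (y : Int) (r : Option (Int × Int)) (b w : PySem.Set (Int × Int)),
    parseGo data (grid ++ "" :: tail) y (r, b, w) =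
      (PySem.Set.update w (pvSel '#' (pvCellsFrom y grid)),
       PySem.Set.update b (pvSel 'O' (pvCellsFrom y grid)),
       (pvSel '@' (pvCellsFrom y grid)).getLast?.or r,
       some (PySem.Str.join "" (PySem.List.slice data (some (y + (grid.length : Int) + 1)) none))) := by
  induction grid with
  | nil =>
    intro tail data y r b w
    simp [parseGo, pvCellsFrom, pvSel, PySem.Set.update]
  | cons l ls ih =>
    intro tail data y r b w
    have hl : l ≠ "" := fun h => hg (h ▸ List.mem_cons_self)
    have hg' : "" ∉ ls := fun h => hg (List.mem_cons_of_mem _ h)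
    simp only [List.cons_append, parseGo, if_neg hl, pvScanLine_eq, ih hg', pvCellsFrom,
      pvSel_append]
    simp only [Prod.mk.injEq]
    refine ⟨?_, ?_, ?_, ?_⟩
    · simp [PySem.Set.update, List.foldl_append]
    · simp [PySem.Set.update, List.foldl_append]
    · simp [List.getLast?_append, Option.or_assoc]
    · congr 3
      simp only [Option.some.injEq, List.length_cons]
      push_cast
      ring

-- ===== VERDICT (by name: the statement is the Claim_ definition above) =====
theorem parse_spec : Claim_equal_parse := by
  intro data _
  unfold Spec_parse parse parse_alt
  cases hidx : PySem.List.index? data "" with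
  | none =>
    have hmem : "" ∉ data := (PySem.List.index?_eq_none_iff _ _).1 hidx
    rw [pvGo_noSep data hmem data 0 none PySem.Set.empty PySem.Set.empty]
    simp [pvCells_eq, pvSel, PySem.Set.ofList_eq_foldl, PySem.Set.update, PySem.Set.empty,
      -List.getLast?_map]
  | some s =>
    obtain ⟨pre, suf, hdata, hlen, hpre⟩ := (PySem.List.index?_eq_some_iff _ _ _).1 hidx
    rw [hdata, pvGo_sep pre hpre suf (pre ++ "" :: suf) 0 none PySem.Set.empty PySem.Set.empty]
    have hgrid : PySem.List.slice (pre ++ "" :: suf) none (some (s : Int)) = pre := by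
      rw [PySem.List.slice_to_natCast, ← hlen, List.take_left]
    simp [hgrid, pvCells_eq, pvSel, PySem.Set.ofList_eq_foldl, PySem.Set.update, PySem.Set.empty,
      hlen, -List.getLast?_map]
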